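-- pv_equiv track=rewrite | github.com/ssmithamnh/UploadForge | UPLOADFORGE.py | counts_odd
-- ===== SOURCE A (Python) =====
-- def counts_odd(series):
--     counts_dict = dict()
--     for item in series:
--         counts_dict[item] = counts_dict.get(item, 0) + 1
--
--     # Check for values with 30 or more occurrences
--     keys_to_split = [key for key, value in counts_dict.items() if value >= 35]
--
--     # Iterate over keys to split occurrences
--     for key in keys_to_split:
--         # Find the index to split the occurrences
--         split_index = counts_dict[key] // 2
--         # Add one extra to the first half if the total count is odd
--         if counts_dict[key] % 2 != 0:
--             split_index += 1
--         # Assign the first half as {f}_1 and the second half as {f}_2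
--         for i, item in enumerate(series):
--             if item == key:
--                 if split_index > 0:
--                     series[i] = f"{key}_1"
--                     split_index -= 1
--                 else:
--                     series[i] = f"{key}_2"
--
--     return series
-- ===== SOURCE B (Python) =====
-- def counts_odd(series):
--     counts = {}
--     for v in series:
--         counts[v] = counts.get(v, 0) + 1
--     seen = {}
--     for i, v in enumerate(series):
--         c = counts[v]
--         if c >= 35:
--             k = seen.get(v, 0)
--             seen[v] = k + 1
--             series[i] = v + ("_1" if k < (c + 1) // 2 else "_2")
--     return series
-- ===== Notes on version B (the rewrite author's own statement) =====
-- stated objective: faster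
-- what changed: A rescans the whole list once per frequent (>=35) key with a split countdown; B makes a single output pass using the precomputed counts and a per-value running occurrence counter, so the per-key rescans disappear (O(n) instead of O(n*f)).
import Mathlib
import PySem

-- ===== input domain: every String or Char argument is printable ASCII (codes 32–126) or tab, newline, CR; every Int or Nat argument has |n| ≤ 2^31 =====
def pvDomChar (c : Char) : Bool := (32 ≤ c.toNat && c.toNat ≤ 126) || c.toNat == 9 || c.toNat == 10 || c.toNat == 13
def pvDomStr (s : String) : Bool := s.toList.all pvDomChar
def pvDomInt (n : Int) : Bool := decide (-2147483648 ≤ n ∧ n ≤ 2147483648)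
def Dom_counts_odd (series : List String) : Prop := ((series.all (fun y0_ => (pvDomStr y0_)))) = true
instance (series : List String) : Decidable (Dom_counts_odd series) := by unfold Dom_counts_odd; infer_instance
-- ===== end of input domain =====

-- B replaces A's per-frequent-key rescans of the list by one output pass driven by the
-- precomputed counts and a running per-value occurrence counter (objective: faster).
-- Both Pythons mutate `series` in place; the equivalence proved here is about the return value.

-- ===== PORT A =====
-- inner loop `for i, item in enumerate(series): if item == key: …` with the split_index countdown
def pvPassA (key : String) : Int → List String → List String
  | _, [] => []
  | split, item :: rest =>
    if item == key then
      if 0 < split then (key ++ "_1") :: pvPassA key (split - 1) rest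
      else (key ++ "_2") :: pvPassA key split rest
    else item :: pvPassA key split rest

def counts_odd (series : List String) : List String :=
  let counts_dict := series.foldl (fun d item => d.insert item (d.getD item 0 + 1)) PySem.Dict.empty
  let keys_to_split := (counts_dict.items.filter (fun p => 35 ≤ p.2)).map Prod.fst
  keys_to_split.foldl (fun s key =>
      -- counts_dict[key]: key is always present, so getD is exact
      let split_index := PySem.Int.floordiv (counts_dict.getD key 0) 2
      pvPassA key (if PySem.Int.mod (counts_dict.getD key 0) 2 ≠ 0 then split_index + 1 else split_index) s)
    series

-- ===== PORT B =====
-- single pass: `seen` maps each frequent value to how many occurrences were already relabelled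
def pvGoB (counts : PySem.Dict String Int) : PySem.Dict String Int → List String → List String
  | _, [] => []
  | seen, v :: rest =>
    let c := counts.getD v 0
    if 35 ≤ c then
      let k := seen.getD v 0
      (v ++ (if k < PySem.Int.floordiv (c + 1) 2 then "_1" else "_2")) :: pvGoB counts (seen.insert v (k + 1)) rest
    else v :: pvGoB counts seen rest

def counts_odd_alt (series : List String) : List String :=
  let counts := series.foldl (fun d v => d.insert v (d.getD v 0 + 1)) PySem.Dict.empty
  pvGoB counts PySem.Dict.empty series

-- ===== PRECONDITION & SPEC =====
-- Pre_ excludes lists in which some value with ≥ 35 occurrences equals another ≥ 35-occurrence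
-- value with "_1"/"_2" appended: there A rescans entries it has already relabelled, so its result
-- is an order-of-processing artefact (it depends on dict insertion order) and B's independent
-- per-value split is an equally defensible reading of that unspecified corner.
def Pre_counts_odd (series : List String) : Prop :=
  ∀ j ∈ series, ∀ k ∈ series, 35 ≤ series.count j → 35 ≤ series.count k →
    j ≠ k ++ "_1" ∧ j ≠ k ++ "_2"
instance (series : List String) : Decidable (Pre_counts_odd series) := by
  unfold Pre_counts_odd; infer_instance

def pvWitness_counts_odd : List String := (["a", "b", "a"])

def Spec_counts_odd (series : List String) (out : List String) : Prop := out = counts_odd_alt series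
instance (series : List String) (out : List String) : Decidable (Spec_counts_odd series out) := by
  unfold Spec_counts_odd; infer_instance

-- ===== CLAIM (what is proved, stated in full; the proofs are below) =====
def Claim_equal_counts_odd : Prop := ∀ (series : List String), Dom_counts_odd series →
  Pre_counts_odd series → Spec_counts_odd series (counts_odd series)

-- ===== LEMMAS AND PROOFS =====

-- ceil(c/2) exactly as A computes it: c//2, plus 1 if c is odd
def pvCeil (c : Int) : Int :=
  if PySem.Int.mod c 2 ≠ 0 then PySem.Int.floordiv c 2 + 1 else PySem.Int.floordiv c 2

-- the common pointwise description: relabel each occurrence of a key in `keys`,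
-- threading for every value the number of its occurrences already seen
def pvRelabel (cnt : String → Int) (keys : List String) : (String → Int) → List String → List String
  | _, [] => []
  | s, v :: rest =>
    (if v ∈ keys then (if s v < pvCeil (cnt v) then v ++ "_1" else v ++ "_2") else v)
      :: pvRelabel cnt keys (fun w => if w = v then s v + 1 else s w) rest

lemma pvCeil_eq_floordiv_succ (c : Int) : pvCeil c = PySem.Int.floordiv (c + 1) 2 := by
  unfold pvCeil
  rw [PySem.Int.floordiv_eq_ediv_of_pos (a := c) (by omega),
      PySem.Int.floordiv_eq_ediv_of_pos (a := c + 1) (by omega),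
      PySem.Int.mod_eq_emod_of_pos (a := c) (by omega)]
  split_ifs with h <;> omega

lemma pvRelabel_nil_keys (cnt : String → Int) :
    ∀ (l : List String) (s : String → Int), pvRelabel cnt [] s l = l := by
  intro l
  induction l with
  | nil => intro s; rfl
  | cons v rest ih => intro s; simp [pvRelabel, ih]

-- one pass of A over an already partially relabelled list adds `key` to the relabelled set
lemma pvPassA_relabel (cnt : String → Int) (key : String) (K : List String)
    (hknK : key ∉ K)
    (hne : ∀ v ∈ K, (v ++ "_1") ≠ key ∧ (v ++ "_2") ≠ key) :
    ∀ (l : List String) (s : String → Int) (split : Int),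
      (0 < split → split = pvCeil (cnt key) - s key) →
      (split ≤ 0 → pvCeil (cnt key) ≤ s key) →
      pvPassA key split (pvRelabel cnt K s l) = pvRelabel cnt (K ++ [key]) s l := by
  intro l
  induction l with
  | nil => intro s split _ _; rfl
  | cons v rest ih =>
    intro s split h1 h2
    by_cases hvkey : v = key
    · subst hvkey
      have hvK : v ∉ K := hknK
      have hb : (fun w => if w = v then s v + 1 else s w) v = s v + 1 := by simp
      have hmem : v ∈ K ++ [v] := List.mem_append_right _ (List.mem_singleton.mpr rfl)
      by_cases hpos : 0 < split
      · have hsplit := h1 hpos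
        have hlt : s v < pvCeil (cnt v) := by omega
        have hrec := ih (fun w => if w = v then s v + 1 else s w) (split - 1)
          (by intro h; rw [hb]; omega) (by intro h; rw [hb]; omega)
        simp [pvRelabel, pvPassA, hvK, hmem, hpos, hlt, hrec]
      · have hge : pvCeil (cnt v) ≤ s v := h2 (by omega)
        have hlt : ¬ s v < pvCeil (cnt v) := by omega
        have hrec := ih (fun w => if w = v then s v + 1 else s w) split
          (by intro h; omega) (by intro h; rw [hb]; omega)
        simp [pvRelabel, pvPassA, hvK, hmem, hpos, hlt, hrec]
    · have hb : (fun w => if w = v then s v + 1 else s w) key = s key := by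
        simp [Ne.symm hvkey]
      have hrec := ih (fun w => if w = v then s v + 1 else s w) split
        (by intro h; rw [hb]; exact h1 h) (by intro h; rw [hb]; exact h2 h)
      by_cases hvK : v ∈ K
      · have hv1 : ((v ++ "_1") == key) = false := by
          simp [beq_eq_false_iff_ne]; exact (hne v hvK).1
        have hv2 : ((v ++ "_2") == key) = false := by
          simp [beq_eq_false_iff_ne]; exact (hne v hvK).2
        simp only [pvRelabel, if_pos hvK, if_pos (List.mem_append_left _ hvK)]
        by_cases hs : s v < pvCeil (cnt v) <;>
          simp [pvPassA, hs, hv1, hv2, hrec]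
      · have hvmem : v ∉ K ++ [key] := by
          simp only [List.mem_append, List.mem_singleton]; tauto
        simp [pvRelabel, pvPassA, hvK, hvmem, hvkey, hrec]

-- A's whole loop over keys_to_split builds pvRelabel over all its keys
lemma pvFoldA (cnt : String → Int) (series : List String) :
    ∀ (keys K : List String), (K ++ keys).Nodup →
      (∀ v ∈ K ++ keys, ∀ u ∈ K ++ keys, (v ++ "_1") ≠ u ∧ (v ++ "_2") ≠ u) →
      keys.foldl (fun s key => pvPassA key (pvCeil (cnt key)) s)
        (pvRelabel cnt K (fun _ => 0) series)
      = pvRelabel cnt (K ++ keys) (fun _ => 0) series := by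
  intro keys
  induction keys with
  | nil => intro K _ _; simp
  | cons key rest ih =>
    intro K hnd hne
    have hknK : key ∉ K := by
      intro h
      rcases List.nodup_append.mp hnd with ⟨_, _, hdisj⟩
      exact hdisj key h key (List.mem_cons_self ..) rfl
    have hstep := pvPassA_relabel cnt key K hknK
      (fun v hv => ⟨(hne v (List.mem_append_left _ hv) key
          (List.mem_append_right _ (List.mem_cons_self ..))).1,
        (hne v (List.mem_append_left _ hv) key
          (List.mem_append_right _ (List.mem_cons_self ..))).2⟩)
      series (fun _ => 0) (pvCeil (cnt key)) (by intro _; simp) (by intro h; simpa using h)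
    have hassoc : (K ++ [key]) ++ rest = K ++ key :: rest := by simp
    have hrec := ih (K ++ [key]) (by rw [hassoc]; exact hnd) (by rw [hassoc]; exact hne)
    simp only [List.foldl_cons, hstep]
    rw [hrec, hassoc]

-- B's single pass builds the same pvRelabel
lemma pvGoB_relabel (series : List String) (cnt : String → Int) (keys : List String)
    (hcnt : ∀ v, (PySem.Dict.counter series).getD v 0 = cnt v)
    (hkeys : ∀ v ∈ series, (v ∈ keys ↔ 35 ≤ cnt v)) :
    ∀ (l : List String) (seen : PySem.Dict String Int) (s : String → Int),
      (∀ v ∈ l, v ∈ series) →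
      (∀ v, 35 ≤ cnt v → seen.getD v 0 = s v) →
      pvGoB (PySem.Dict.counter series) seen l = pvRelabel cnt keys s l := by
  intro l
  induction l with
  | nil => intro seen s _ _; rfl
  | cons v rest ih =>
    intro seen s hsub hseen
    have hvser : v ∈ series := hsub v (List.mem_cons_self ..)
    by_cases hc : 35 ≤ cnt v
    · have hvkeys : v ∈ keys := (hkeys v hvser).mpr hc
      have hrec := ih (seen.insert v (seen.getD v 0 + 1)) (fun w => if w = v then s v + 1 else s w)
        (fun w hw => hsub w (List.mem_cons_of_mem _ hw))
        (by
          intro w hw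
          by_cases hwv : w = v
          · subst hwv; simp [hseen w hw]
          · simp [PySem.Dict.getD_insert, hwv, hseen w hw])
      rw [hseen v hc] at hrec
      simp [pvGoB, pvRelabel, hcnt, hc, hvkeys, hseen v hc, hrec,
        pvCeil_eq_floordiv_succ, apply_ite (fun t => v ++ t)]
    · have hvkeys : v ∉ keys := fun h => hc ((hkeys v hvser).mp h)
      have hrec := ih seen (fun w => if w = v then s v + 1 else s w)
        (fun w hw => hsub w (List.mem_cons_of_mem _ hw))
        (by
          intro w hw
          have hwv : w ≠ v := fun h => hc (h ▸ hw)
          simpa [hwv] using hseen w hw)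
      simp [pvGoB, pvRelabel, hcnt, hc, hvkeys, hrec]

-- ===== VERDICT (by name: the statement is the Claim_ definition above) =====
theorem counts_odd_spec : Claim_equal_counts_odd := by
  unfold Claim_equal_counts_odd Spec_counts_odd
  intro series _ hpre
  set cnt : String → Int := fun v => (series.count v : Int) with hcnt
  -- both programs build the same counts dict
  have hdict : series.foldl (fun d item => d.insert item (d.getD item 0 + 1)) PySem.Dict.empty
      = PySem.Dict.counter series := PySem.Dict.foldl_insert_getD_add_one_eq_counter series
  have hgetD : ∀ v, (PySem.Dict.counter series).getD v 0 = cnt v := by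
    intro v; rw [PySem.Dict.getD_counter]
  -- keys_to_split as a filtered dedup of series
  set keys : List String := (PySem.Set.ofList series).filter (fun k => decide (35 ≤ cnt k)) with hkeysdef
  have hitems : ((PySem.Dict.counter series).items.filter (fun p => 35 ≤ p.2)).map Prod.fst = keys := by
    rw [PySem.Dict.items_counter, List.filter_map, List.map_map, hkeysdef]
    simp [Function.comp_def, hcnt]
  have hmemkeys : ∀ v, v ∈ keys ↔ v ∈ series ∧ 35 ≤ cnt v := by
    intro v
    rw [hkeysdef]
    simp [List.mem_filter, PySem.Set.mem_ofList]
  have hndkeys : keys.Nodup := List.Nodup.filter _ (PySem.Set.nodup_ofList series)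
  -- side A
  have hA : counts_odd series = keys.foldl (fun s key => pvPassA key (pvCeil (cnt key)) s) series := by
    simp only [counts_odd, hdict, hitems]
    congr 1
    funext s key
    simp only [hgetD, pvCeil]
  have hne : ∀ v ∈ keys, ∀ u ∈ keys, (v ++ "_1") ≠ u ∧ (v ++ "_2") ≠ u := by
    intro v hv u hu
    obtain ⟨hvs, hvc⟩ := (hmemkeys v).mp hv
    obtain ⟨hus, huc⟩ := (hmemkeys u).mp hu
    have huc' : 35 ≤ series.count u := by simp [hcnt] at huc; exact_mod_cast huc
    have hvc' : 35 ≤ series.count v := by simp [hcnt] at hvc; exact_mod_cast hvc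
    have := hpre u hus v hvs huc' hvc'
    exact ⟨fun h => this.1 h.symm, fun h => this.2 h.symm⟩
  have hAfull : counts_odd series = pvRelabel cnt keys (fun _ => 0) series := by
    rw [hA]
    have := pvFoldA cnt series keys [] (by simpa using hndkeys) (by simpa using hne)
    simpa [pvRelabel_nil_keys] using this
  -- side B
  have hB : counts_odd_alt series = pvRelabel cnt keys (fun _ => 0) series := by
    simp only [counts_odd_alt, hdict]
    exact pvGoB_relabel series cnt keys hgetD
      (fun v hvs => by rw [hmemkeys]; tauto)
      series PySem.Dict.empty (fun _ => 0) (fun v hv => hv)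
      (by intro v _; simp [PySem.Dict.getD_empty])
  rw [hAfull, hB]
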